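-- pv_equiv track=rewrite | github.com/MrBrantCode/unitest_baseline | mut_generate/mist_train_cf/cf_80347/solution.py | account_activities
-- ===== SOURCE A (Python) =====
-- from typing import List, Tuple
--
-- def account_activities(operations: List[List[int]], fees: List[List[int]]) -> List[Tuple[bool, float]]:
--     result = []
--     for operation, fee in zip(operations, fees):
--         balance = 0
--         goes_negative = False
--         for op, fee in zip(operation, fee):
--             balance += op - fee
--             if balance < 0:
--                 goes_negative = True
--         result.append((goes_negative, round(balance, 2)))
--     return result
-- ===== SOURCE B (Python) =====
-- from typing import List, Tuple
--
-- def _row(operation: List[int], fee: List[int]) -> Tuple[bool, float]: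
--     deltas = [op - f for op, f in zip(operation, fee)]
--     # right-to-left suffix DP: t = min(0, minimum prefix sum of the suffix)
--     t = 0
--     for d in reversed(deltas):
--         t = min(0, d + t)
--     return (t < 0, round(sum(deltas), 2))
--
-- def account_activities(operations: List[List[int]], fees: List[List[int]]) -> List[Tuple[bool, float]]:
--     return [_row(op, f) for op, f in zip(operations, fees)]
-- ===== Notes on version B (the rewrite author's own statement) =====
-- stated objective: alternative
-- what changed: A's forward simulation carrying (running balance, negativity flag) is replaced by a right-to-left suffix dynamic program t = min(0, d + t) over the reversed delta list, whose result is the minimum prefix sum clipped at 0 (flag = t < 0), with the final balance computed separately as sum(deltas).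
import Mathlib
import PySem

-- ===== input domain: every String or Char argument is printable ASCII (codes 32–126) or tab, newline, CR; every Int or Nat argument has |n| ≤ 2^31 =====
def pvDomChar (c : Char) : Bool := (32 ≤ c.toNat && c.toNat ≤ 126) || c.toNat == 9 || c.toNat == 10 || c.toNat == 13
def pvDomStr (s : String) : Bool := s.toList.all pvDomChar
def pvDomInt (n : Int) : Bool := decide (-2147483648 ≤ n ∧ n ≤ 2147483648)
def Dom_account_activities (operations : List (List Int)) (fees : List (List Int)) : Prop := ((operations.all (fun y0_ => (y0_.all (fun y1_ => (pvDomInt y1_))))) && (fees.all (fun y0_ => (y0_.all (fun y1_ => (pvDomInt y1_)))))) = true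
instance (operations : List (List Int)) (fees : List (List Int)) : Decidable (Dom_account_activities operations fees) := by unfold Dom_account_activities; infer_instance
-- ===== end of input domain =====

-- B replaces A's forward (balance, flag) simulation by a right-to-left suffix DP
-- t = min(0, d + t) over the reversed deltas plus a separate sum; alternative, same cost.


-- ===== PORT A =====
-- inner loop of A: state (balance, goes_negative), one update per (op, fee) pair
def pvRowA (operation fee : List Int) : Bool × Int :=
  let st := (List.zip operation fee).foldl
    (fun (st : Int × Bool) p =>
      let b := st.1 + (p.1 - p.2)
      (b, st.2 || decide (b < 0)))
    (0, false)
  (st.2, st.1)   -- round(balance, 2) on an int is the int itself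

def account_activities (operations : List (List Int)) (fees : List (List Int)) : List (Bool × Int) :=
  (List.zip operations fees).foldl (fun result p => result ++ [pvRowA p.1 p.2]) []

-- ===== PORT B =====
-- B's row: delta list, reversed-order suffix DP t = min(0, d + t), flag t < 0, balance = sum
def pvRowB (operation fee : List Int) : Bool × Int :=
  let deltas := List.zipWith (fun op f => op - f) operation fee
  let t := deltas.reverse.foldl (fun t d => min 0 (d + t)) 0
  (decide (t < 0), deltas.sum)   -- round(sum, 2) on an int is the int itself

def account_activities_alt (operations : List (List Int)) (fees : List (List Int)) : List (Bool × Int) :=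
  (List.zip operations fees).map (fun p => pvRowB p.1 p.2)

-- ===== PRECONDITION & SPEC =====
def Spec_account_activities (operations : List (List Int)) (fees : List (List Int)) (out : List (Bool × Int)) : Prop := out = account_activities_alt operations fees
instance (operations : List (List Int)) (fees : List (List Int)) (out : List (Bool × Int)) : Decidable (Spec_account_activities operations fees out) := by unfold Spec_account_activities; infer_instance

-- ===== CLAIM (what is proved, stated in full; the proofs are below) =====
def Claim_equal_account_activities : Prop := ∀ (operations : List (List Int)) (fees : List (List Int)), Dom_account_activities operations fees → Spec_account_activities operations fees (account_activities operations fees)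

-- ===== LEMMAS AND PROOFS =====

-- "some prefix of ds starting from balance b dips below 0" (A's flag contribution)
def pvAnyNeg (b : Int) : List Int → Bool
  | [] => false
  | d :: ds => decide (b + d < 0) || pvAnyNeg (b + d) ds

-- A's inner fold characterised: final balance = b + sum, flag = g || pvAnyNeg b ds
theorem pvFoldA_char (ds : List Int) (b : Int) (g : Bool) :
    ds.foldl (fun (st : Int × Bool) d => ((st.1 + d : Int), st.2 || decide (st.1 + d < 0))) (b, g)
      = (b + ds.sum, g || pvAnyNeg b ds) := by
  induction ds generalizing b g with
  | nil => simp [pvAnyNeg]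
  | cons d ds ih =>
      simp only [List.foldl_cons, pvAnyNeg, List.sum_cons]
      rw [ih]
      simp only [Prod.mk.injEq]
      exact ⟨by omega, by simp [Bool.or_assoc]⟩

-- B's DP value (foldr form of the reversed foldl) is always ≤ 0
theorem pvT_nonpos (ds : List Int) : ds.foldr (fun d t => min 0 (d + t)) 0 ≤ 0 := by
  cases ds <;> simp

-- for a nonnegative start, A's dip test equals B's clipped-min-prefix test
theorem pvAnyNeg_eq_T (ds : List Int) (b : Int) (hb : 0 ≤ b) :
    pvAnyNeg b ds = decide (b + ds.foldr (fun d t => min 0 (d + t)) 0 < 0) := by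
  induction ds generalizing b with
  | nil => simp [pvAnyNeg]; omega
  | cons d ds ih =>
      simp only [pvAnyNeg, List.foldr_cons]
      by_cases h : b + d < 0
      · have := pvT_nonpos ds
        simp only [h, decide_true, Bool.true_or]
        have : b + min 0 (d + ds.foldr (fun d t => min 0 (d + t)) 0) < 0 := by omega
        simp [this]
      · push Not at h
        have hbd : 0 ≤ b + d := by omega
        rw [ih (b + d) hbd]
        simp only [h.not_gt, decide_false, Bool.false_or]
        congr 1
        rw [eq_iff_iff]
        omega

-- the two zip traversals feed the same deltas in the same order
theorem pvZip_fold_eq (operation fee : List Int) (st : Int × Bool) :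
    (List.zip operation fee).foldl
        (fun (st : Int × Bool) p =>
          ((st.1 + (p.1 - p.2) : Int), st.2 || decide (st.1 + (p.1 - p.2) < 0))) st
      = (List.zipWith (fun op f => op - f) operation fee).foldl
          (fun (st : Int × Bool) d => ((st.1 + d : Int), st.2 || decide (st.1 + d < 0))) st := by
  induction operation generalizing fee st with
  | nil => simp
  | cons a l ih =>
      cases fee with
      | nil => simp
      | cons b m => simp only [List.zip_cons_cons, List.zipWith_cons_cons, List.foldl_cons]; exact ih m _

theorem pvRow_eq (operation fee : List Int) : pvRowA operation fee = pvRowB operation fee := by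
  simp only [pvRowA, pvRowB, pvZip_fold_eq, pvFoldA_char, List.foldl_reverse,
    Bool.false_or, zero_add]
  rw [pvAnyNeg_eq_T _ 0 le_rfl]
  simp

-- A's foldl-append accumulation is the map of the row function
theorem pvFoldl_append_map (l : List (List Int × List Int)) (acc : List (Bool × Int)) :
    l.foldl (fun result p => result ++ [pvRowA p.1 p.2]) acc = acc ++ l.map (fun p => pvRowB p.1 p.2) := by
  induction l generalizing acc with
  | nil => simp
  | cons p l ih => rw [List.foldl_cons, ih, pvRow_eq]; simp

-- ===== VERDICT (by name: the statement is the Claim_ definition above) =====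
theorem account_activities_spec : Claim_equal_account_activities := by
  intro operations fees _
  unfold Spec_account_activities account_activities account_activities_alt
  rw [pvFoldl_append_map]
  simp
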